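-- pv_equiv track=rewrite | github.com/Vigneswar-A/vigneswar-a.github.io | programming/leetcode/2638.py | evenProduct
-- ===== SOURCE A (Python) =====
-- from typing import List
--
-- def evenProduct(nums: List[int]) -> int:
--
--     n = len(nums)
--     i = 0
--     subs = 0
--     while i < n:
--         left = i
--         while i < n and nums[i]%2:
--             i += 1
--         x = (i-left)
--         subs += x*(x+1) // 2
--         i += 1
--
--     return n*(n+1)//2 - subs
-- ===== SOURCE B (Python) =====
-- from typing import List
--
-- def evenProduct(nums: List[int]) -> int:
--     total = 0
--     last_even = -1
--     for i, x in enumerate(nums):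
--         if x % 2 == 0:
--             last_even = i
--         total += last_even + 1
--     return total
-- ===== Notes on version B (the rewrite author's own statement) =====
-- stated objective: simpler
-- what changed: Replaces A's complement counting (total subarrays minus all-odd subarrays, found by scanning maximal odd runs with a nested while loop) with a single forward pass that tracks the last even index and adds last_even+1 valid left endpoints per right endpoint.
import Mathlib
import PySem

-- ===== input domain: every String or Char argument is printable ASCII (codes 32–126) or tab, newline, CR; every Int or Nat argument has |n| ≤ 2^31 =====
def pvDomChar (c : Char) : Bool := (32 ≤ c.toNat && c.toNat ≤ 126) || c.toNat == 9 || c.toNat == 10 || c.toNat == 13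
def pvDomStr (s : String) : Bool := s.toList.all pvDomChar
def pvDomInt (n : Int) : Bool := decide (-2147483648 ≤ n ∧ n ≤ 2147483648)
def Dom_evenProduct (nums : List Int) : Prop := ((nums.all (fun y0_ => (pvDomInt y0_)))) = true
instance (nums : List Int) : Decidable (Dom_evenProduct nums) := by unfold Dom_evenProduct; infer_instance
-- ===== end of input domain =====

-- B replaces A's complement counting over maximal odd runs by a direct single pass
-- adding, at each right endpoint, the number of valid left endpoints (last even index + 1);
-- objective: simpler.

-- ===== PORT A =====

-- inner while loop: 'while i < n and nums[i] % 2: i += 1'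
def evenProductInner (nums : List Int) (i : Nat) : Nat :=
  if h : i < nums.length then
    if PySem.Int.mod nums[i] 2 ≠ 0 then evenProductInner nums (i + 1) else i
  else i
termination_by nums.length - i

theorem evenProductInner_ge (nums : List Int) (i : Nat) : i ≤ evenProductInner nums i := by
  unfold evenProductInner
  by_cases h : i < nums.length
  · rw [dif_pos h]
    by_cases ho : PySem.Int.mod nums[i] 2 ≠ 0
    · rw [if_pos ho]
      exact le_trans (Nat.le_succ i) (evenProductInner_ge nums (i + 1))
    · rw [if_neg ho]
  · rw [dif_neg h]
termination_by nums.length - i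

-- outer while loop of A
def evenProductOuter (nums : List Int) (i : Nat) (subs : Int) : Int :=
  if i < nums.length then
    let j := evenProductInner nums i
    let x : Int := (j : Int) - (i : Int)
    evenProductOuter nums (j + 1) (subs + PySem.Int.floordiv (x * (x + 1)) 2)
  else subs
termination_by nums.length - i
decreasing_by have := evenProductInner_ge nums i; omega

def evenProduct (nums : List Int) : Int :=
  let n : Int := nums.length
  PySem.Int.floordiv (n * (n + 1)) 2 - evenProductOuter nums 0 0

-- ===== PORT B =====

-- the for loop over enumerate(nums); state = (last_even, total), i is the enumerate counter
def evenProductGo (l : List Int) (i : Int) (st : Int × Int) : Int × Int :=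
  match l with
  | [] => st
  | x :: xs =>
    let last := if PySem.Int.mod x 2 == 0 then i else st.1
    evenProductGo xs (i + 1) (last, st.2 + last + 1)

def evenProduct_alt (nums : List Int) : Int :=
  (evenProductGo nums 0 (-1, 0)).2

-- ===== PRECONDITION & SPEC =====
def Spec_evenProduct (nums : List Int) (out : Int) : Prop := out = evenProduct_alt nums
instance (nums : List Int) (out : Int) : Decidable (Spec_evenProduct nums out) := by unfold Spec_evenProduct; infer_instance

-- ===== CLAIM (what is proved, stated in full; the proofs are below) =====
def Claim_equal_evenProduct : Prop := ∀ (nums : List Int), Dom_evenProduct nums → Spec_evenProduct nums (evenProduct nums)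

-- ===== LEMMAS AND PROOFS =====

-- the odd predicate used by both programs (Python's x % 2 with positive divisor)
def pvOdd (x : Int) : Bool := PySem.Int.mod x 2 ≠ 0

def pvTri (x : Int) : Int := PySem.Int.floordiv (x * (x + 1)) 2

theorem pvOdd_takeWhile_le (l : List Int) : (l.takeWhile pvOdd).length ≤ l.length := by
  induction l with
  | nil => simp
  | cons x xs ih =>
    rw [List.takeWhile_cons]
    by_cases h : pvOdd x = true <;> simp [h] <;> omega

-- reference value of A's subs accumulator, structurally on the list
def pvSubs (l : List Int) : Int :=
  match l with
  | [] => 0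
  | x :: xs =>
    let k := ((x :: xs).takeWhile pvOdd).length
    pvTri k + pvSubs ((x :: xs).drop (k + 1))
termination_by l.length
decreasing_by simp

theorem pvSubs_nil : pvSubs [] = 0 := by rw [pvSubs.eq_def]

theorem pvSubs_cons (x : Int) (xs : List Int) :
    pvSubs (x :: xs) = pvTri ((x :: xs).takeWhile pvOdd).length
      + pvSubs ((x :: xs).drop (((x :: xs).takeWhile pvOdd).length + 1)) := by
  rw [pvSubs.eq_def]

theorem two_mul_pvTri (x : Int) : 2 * pvTri x = x * (x + 1) := by
  have hdvd : (2 : Int) ∣ x * (x + 1) := (Int.even_mul_succ_self x).two_dvd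
  unfold pvTri
  rw [PySem.Int.floordiv_eq_ediv_of_pos (by norm_num)]
  exact Int.mul_ediv_cancel' hdvd

theorem pvTri_zero : pvTri 0 = 0 := by
  have := two_mul_pvTri 0
  linarith

theorem pvTri_split (k m : Int) :
    pvTri (k + m + 1) - pvTri k - pvTri m = (k + 1) * (m + 1) := by
  have h1 := two_mul_pvTri (k + m + 1)
  have h2 := two_mul_pvTri k
  have h3 := two_mul_pvTri m
  have : 2 * (pvTri (k + m + 1) - pvTri k - pvTri m) = 2 * ((k + 1) * (m + 1)) := by
    rw [mul_sub, mul_sub, h1, h2, h3]; ring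
  linarith

theorem evenProductInner_spec (nums : List Int) (fuel i : Nat)
    (hf : nums.length - i ≤ fuel) :
    evenProductInner nums i = i + ((nums.drop i).takeWhile pvOdd).length := by
  induction fuel generalizing i with
  | zero =>
    unfold evenProductInner
    have hi : ¬ i < nums.length := by omega
    simp [hi, List.drop_eq_nil_of_le (by omega : nums.length ≤ i)]
  | succ fuel ih =>
    unfold evenProductInner
    by_cases hi : i < nums.length
    · rw [dif_pos hi]
      by_cases hodd : PySem.Int.mod nums[i] 2 ≠ 0
      · rw [if_pos hodd]
        have hb : pvOdd nums[i] = true := by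
          simp only [pvOdd, decide_eq_true_eq]; exact hodd
        rw [ih (i + 1) (by omega)]
        rw [List.drop_eq_getElem_cons hi, List.takeWhile_cons, hb]
        simp only [if_pos, List.length_cons]
        omega
      · rw [if_neg hodd]
        have h0 : PySem.Int.mod nums[i] 2 = 0 := by
          by_contra h; exact hodd h
        have hb : pvOdd nums[i] = false := by
          simp only [pvOdd, ne_eq, h0, not_true_eq_false, decide_false]
        rw [List.drop_eq_getElem_cons hi, List.takeWhile_cons, hb]
        simp
    · have hle : nums.length ≤ i := by omega
      rw [dif_neg hi]
      simp [List.drop_eq_nil_of_le hle]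

theorem evenProductOuter_spec (nums : List Int) (fuel i : Nat) (subs : Int)
    (hf : nums.length - i ≤ fuel) :
    evenProductOuter nums i subs = subs + pvSubs (nums.drop i) := by
  induction fuel generalizing i subs with
  | zero =>
    unfold evenProductOuter
    have hi : ¬ i < nums.length := by omega
    rw [if_neg hi, List.drop_eq_nil_of_le (by omega : nums.length ≤ i), pvSubs_nil]
    ring
  | succ fuel ih =>
    unfold evenProductOuter
    by_cases hi : i < nums.length
    · simp only [hi, if_pos]
      have hinner := evenProductInner_spec nums (nums.length - i) i (by omega)
      set k : Nat := ((nums.drop i).takeWhile pvOdd).length with hk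
      have hkle : k ≤ nums.length - i := by
        have := pvOdd_takeWhile_le (nums.drop i)
        simpa [hk] using this
      rw [hinner]
      have hx : ((i + k : Nat) : Int) - (i : Int) = (k : Int) := by push_cast; ring
      rw [hx]
      rw [ih (i + k + 1) _ (by omega)]
      have hne : nums.drop i ≠ [] := by
        intro h
        have := List.drop_eq_nil_iff.mp h
        omega
      obtain ⟨y, ys, hys⟩ := List.exists_cons_of_ne_nil hne
      have hrw : pvSubs (nums.drop i) = pvTri k + pvSubs ((nums.drop i).drop (k + 1)) := by
        rw [hys, pvSubs_cons, ← hys, ← hk]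
      rw [hrw, List.drop_drop]
      simp only [pvTri]
      have hidx : i + (k + 1) = i + k + 1 := by omega
      rw [hidx]
      ring
    · have hle : nums.length ≤ i := by omega
      rw [if_neg hi, List.drop_eq_nil_of_le hle, pvSubs_nil]
      ring

-- A's value in reference form
theorem evenProduct_eq (nums : List Int) :
    evenProduct nums = pvTri nums.length - pvSubs nums := by
  unfold evenProduct pvTri
  rw [evenProductOuter_spec nums nums.length 0 0 (by omega)]
  simp

-- B: shifting the counter and last_even by c shifts the total by c per element,
-- and the accumulator is additive
theorem evenProductGo_snd (l : List Int) : ∀ (c i last t : Int),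
    (evenProductGo l i (last, t)).2
      = t + c * l.length + (evenProductGo l (i - c) (last - c, 0)).2 := by
  induction l with
  | nil => intro c i last t; simp [evenProductGo]
  | cons x xs ih =>
    intro c i last t
    by_cases he : (PySem.Int.mod x 2 == 0) = true
    · simp only [evenProductGo, he, if_pos]
      rw [ih c (i + 1) i (t + i + 1), ih 0 (i - c + 1) (i - c) (0 + (i - c) + 1)]
      have e1 : i + 1 - c = i - c + 1 := by ring
      have e2 : i - c - 0 = i - c := by ring
      have e3 : i - c + 1 - 0 = i - c + 1 := by ring
      rw [e1, e2, e3]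
      simp only [List.length_cons]
      push_cast
      ring
    · simp only [evenProductGo, he, if_neg, Bool.not_eq_true]
      rw [ih c (i + 1) last (t + last + 1),
          ih 0 (i - c + 1) (last - c) (0 + (last - c) + 1)]
      have e1 : i + 1 - c = i - c + 1 := by ring
      have e2 : last - c - 0 = last - c := by ring
      have e3 : i - c + 1 - 0 = i - c + 1 := by ring
      rw [e1, e2, e3]
      simp only [List.length_cons]
      push_cast
      ring

-- B on an all-odd block: last_even never moves, each element contributes last+1
theorem evenProductGo_allOdd (l : List Int) (hodd : ∀ x ∈ l, pvOdd x = true) :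
    ∀ (i last t : Int), evenProductGo l i (last, t) = (last, t + l.length * (last + 1)) := by
  induction l with
  | nil => intro i last t; simp [evenProductGo]
  | cons x xs ih =>
    intro i last t
    have hx : pvOdd x = true := hodd x (List.mem_cons_self)
    unfold pvOdd at hx
    have hxm : PySem.Int.mod x 2 ≠ 0 := of_decide_eq_true hx
    have hx' : ¬ ((PySem.Int.mod x 2 == 0) = true) := by
      simp only [beq_iff_eq]
      exact hxm
    simp only [evenProductGo, hx', if_neg, Bool.not_eq_true]
    rw [ih (fun y hy => hodd y (List.mem_cons_of_mem x hy))]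
    simp only [Prod.mk.injEq, List.length_cons]
    exact ⟨trivial, by push_cast; ring⟩

theorem evenProductGo_append (l1 l2 : List Int) (i : Int) (st : Int × Int) :
    evenProductGo (l1 ++ l2) i st = evenProductGo l2 (i + l1.length) (evenProductGo l1 i st) := by
  induction l1 generalizing i st with
  | nil => simp [evenProductGo]
  | cons x xs ih =>
    simp only [List.cons_append, evenProductGo, ih]
    congr 1
    simp only [List.length_cons]
    push_cast
    ring

-- takeWhile over the decomposition odds ++ e :: rest
theorem takeWhile_decomp (odds : List Int) (e : Int) (rest : List Int)
    (hodds : ∀ x ∈ odds, pvOdd x = true) (he : pvOdd e = false) :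
    (odds ++ e :: rest).takeWhile pvOdd = odds := by
  induction odds with
  | nil => simp [List.takeWhile_cons, he]
  | cons x xs ih =>
    have hx := hodds x (List.mem_cons_self)
    simp [List.takeWhile_cons, hx, ih (fun y hy => hodds y (List.mem_cons_of_mem x hy))]

theorem drop_decomp (odds : List Int) (e : Int) (rest : List Int) :
    (odds ++ e :: rest).drop (odds.length + 1) = rest := by
  rw [List.drop_append]
  simp

theorem dropWhile_head_false (p : Int → Bool) (l : List Int) (e : Int) (rest : List Int)
    (h : l.dropWhile p = e :: rest) : p e = false := by
  induction l with
  | nil => simp at h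
  | cons x xs ih =>
    rw [List.dropWhile_cons] at h
    by_cases hp : p x = true
    · simp only [hp, if_pos] at h
      exact ih h
    · simp only [hp, if_neg, Bool.not_eq_true] at h
      have hx : x = e := (List.cons.injEq x xs e rest ▸ h).1
      rw [← hx]
      simpa using hp

-- main equality, by strong induction on the length, splitting at the first even element
theorem pv_main (fuel : Nat) : ∀ (nums : List Int), nums.length ≤ fuel →
    evenProduct nums = evenProduct_alt nums := by
  induction fuel with
  | zero =>
    intro nums h
    have hnil : nums = [] := List.eq_nil_of_length_eq_zero (by omega)
    subst hnil
    rw [evenProduct_eq, pvSubs_nil]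
    simp [evenProduct_alt, evenProductGo, pvTri_zero]
  | succ fuel ih =>
    intro nums hlen
    by_cases hall : ∀ x ∈ nums, pvOdd x = true
    · -- all odd: both sides are 0
      have hB : evenProduct_alt nums = 0 := by
        unfold evenProduct_alt
        rw [evenProductGo_allOdd nums hall]
        simp
      have htake : nums.takeWhile pvOdd = nums := List.takeWhile_eq_self_iff.mpr hall
      have hA : evenProduct nums = 0 := by
        rw [evenProduct_eq]
        cases nums with
        | nil => rw [pvSubs_nil]; simp [pvTri_zero]
        | cons y ys =>
          rw [pvSubs_cons, htake]
          rw [List.drop_eq_nil_of_le (by simp), pvSubs_nil]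
          ring
      rw [hA, hB]
    · -- there is an even element: split at the first one
      push_neg at hall
      obtain ⟨z, hz, hnz⟩ := hall
      set odds := nums.takeWhile pvOdd with hodds_def
      have hdrop_ne : nums.dropWhile pvOdd ≠ [] := by
        intro hnil
        have htw : nums.takeWhile pvOdd = nums := by
          have := List.takeWhile_append_dropWhile (p := pvOdd) (l := nums)
          rw [hnil, List.append_nil] at this
          exact this
        exact hnz (List.mem_takeWhile_imp (show z ∈ nums.takeWhile pvOdd by rw [htw]; exact hz))
      obtain ⟨e, rest, hd⟩ := List.exists_cons_of_ne_nil hdrop_ne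
      have hdecomp : nums = odds ++ e :: rest := by
        rw [hodds_def, ← hd]
        exact (List.takeWhile_append_dropWhile (p := pvOdd) (l := nums)).symm
      have hoddsall : ∀ x ∈ odds, pvOdd x = true := fun x hx =>
        List.mem_takeWhile_imp hx
      have he : pvOdd e = false := dropWhile_head_false pvOdd nums e rest hd
      have he' : (PySem.Int.mod e 2 == 0) = true := by
        simp only [pvOdd, ne_eq, decide_eq_false_iff_not, not_not] at he
        simp only [beq_iff_eq]
        exact he
      set k : Nat := odds.length with hk
      set m : Nat := rest.length with hm
      have hrestlen : rest.length ≤ fuel := by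
        rw [hdecomp] at hlen
        simp at hlen
        omega
      have hIH := ih rest hrestlen
      -- A side
      have hsubs : pvSubs nums = pvTri k + pvSubs rest := by
        conv_lhs => rw [hdecomp]
        cases hoe : odds with
        | nil =>
          rw [List.nil_append, pvSubs_cons]
          have htw0 : ((e :: rest).takeWhile pvOdd).length = 0 := by
            simp [List.takeWhile_cons, he]
          rw [htw0]
          simp [hk, hoe]
        | cons o os =>
          rw [List.cons_append, pvSubs_cons, ← List.cons_append]
          rw [takeWhile_decomp (o :: os) e rest (hoe ▸ hoddsall) he]
          rw [drop_decomp (o :: os) e rest]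
          rw [hk, hoe]
      have hnlen : nums.length = k + (m + 1) := by
        rw [hdecomp]; simp [hk, hm]
      have hA : evenProduct nums = evenProduct rest + ((k : Int) + 1) * ((m : Int) + 1) := by
        rw [evenProduct_eq, evenProduct_eq, hsubs]
        have hn : (nums.length : Int) = (k : Int) + (m : Int) + 1 := by
          rw [hnlen]; push_cast; ring
        rw [hn, ← hm]
        have := pvTri_split (k : Int) (m : Int)
        linarith
      -- B side
      have hB : evenProduct_alt nums = evenProduct_alt rest + ((k : Int) + 1) * ((m : Int) + 1) := by
        unfold evenProduct_alt
        conv_lhs => rw [hdecomp]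
        rw [evenProductGo_append]
        rw [evenProductGo_allOdd odds hoddsall 0 (-1) 0]
        simp only [evenProductGo, he', if_pos]
        norm_num
        rw [evenProductGo_snd rest ((k : Int) + 1) ((k : Int) + 1) (k : Int) ((k : Int) + 1)]
        have e1 : (k : Int) + 1 - ((k : Int) + 1) = 0 := by ring
        have e2 : (k : Int) - ((k : Int) + 1) = -1 := by ring
        rw [e1, e2, ← hm]
        push_cast
        ring
      rw [hA, hB, hIH]

-- ===== VERDICT (by name: the statement is the Claim_ definition above) =====
theorem evenProduct_spec : Claim_equal_evenProduct := by
  intro nums _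
  unfold Spec_evenProduct
  exact pv_main nums.length nums (le_refl _)
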